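-- pv_equiv track=rewrite | github.com/davjdk/ThermoCalcBot | tests/telegram_bot/utils/test_helpers.py | extract_table_from_response
-- ===== SOURCE A (Python) =====
-- from typing import List, Dict, Any, Optional
--
-- def extract_table_from_response(response: str) -> List[str]:
--     """Извлечение таблицы из ответа"""
--     lines = response.split('\n')
--     table_lines = []
--     in_table = False
--
--     for line in lines:
--         if '|' in line and ('T' in line or 'K' in line):
--             in_table = True
--             table_lines.append(line)
--         elif in_table and '|' in line:
--             table_lines.append(line)
--         elif in_table and '|' not in line:
--             break
--
--     return table_lines
-- ===== SOURCE B (Python) =====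
-- def extract_table_from_response(response: str):
--     """Group lines into maximal runs of consecutive '|' lines, then return the
--     suffix of the first run that contains a header line ('T' or 'K')."""
--     lines = response.split('\n')
--     runs = []
--     cur = []
--     for line in lines:
--         if '|' in line:
--             cur.append(line)
--         elif cur:
--             runs.append(cur)
--             cur = []
--     if cur:
--         runs.append(cur)
--     for run in runs:
--         for j, line in enumerate(run):
--             if 'T' in line or 'K' in line:
--                 return run[j:]
--     return []
-- ===== Notes on version B (the rewrite author's own statement) =====
-- stated objective: alternative
-- what changed: Replaces the flag-driven single-pass state machine with a group-then-select structure: lines are first grouped into maximal runs of consecutive '|' lines, then the answer is the suffix from the first 'T'/'K' line of the first run containing one.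
import Mathlib
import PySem

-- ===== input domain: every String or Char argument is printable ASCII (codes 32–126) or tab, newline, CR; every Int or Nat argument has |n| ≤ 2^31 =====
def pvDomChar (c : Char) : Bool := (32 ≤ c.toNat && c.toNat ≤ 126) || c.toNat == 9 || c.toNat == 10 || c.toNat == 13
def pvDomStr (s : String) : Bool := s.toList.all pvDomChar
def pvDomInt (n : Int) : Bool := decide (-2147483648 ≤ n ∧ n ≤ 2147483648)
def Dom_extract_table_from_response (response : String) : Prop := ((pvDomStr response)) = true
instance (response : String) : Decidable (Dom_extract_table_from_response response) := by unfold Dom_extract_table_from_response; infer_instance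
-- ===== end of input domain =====

-- B replaces A's in_table flag state machine by a group-then-select structure (alternative decomposition, same cost).

-- ===== PORT A =====
-- A's loop with the in_table flag; 'break' = return the accumulated lines.
def pvALoop (lines : List String) (tableLines : List String) (inTable : Bool) : List String :=
  match lines with
  | [] => tableLines
  | line :: rest =>
    if PySem.Str.isIn "|" line && (PySem.Str.isIn "T" line || PySem.Str.isIn "K" line) then
      pvALoop rest (tableLines ++ [line]) true
    else if inTable && PySem.Str.isIn "|" line then
      pvALoop rest (tableLines ++ [line]) true
    else if inTable && !(PySem.Str.isIn "|" line) then
      tableLines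
    else
      pvALoop rest tableLines inTable

def extract_table_from_response (response : String) : List String :=
  pvALoop (((PySem.Str.split? response "\n").getD [])) [] false

-- ===== PORT B =====
-- Phase 1: group the lines into maximal runs of consecutive '|'-containing lines.
def pvRunsLoop (lines : List String) (cur : List String) (runs : List (List String)) :
    List (List String) :=
  match lines with
  | [] => if cur.isEmpty then runs else runs ++ [cur]
  | line :: rest =>
    if PySem.Str.isIn "|" line then pvRunsLoop rest (cur ++ [line]) runs
    else if !cur.isEmpty then pvRunsLoop rest [] (runs ++ [cur])
    else pvRunsLoop rest [] runs

-- Phase 2, inner loop: the suffix of a run from its first 'T'/'K' line, if any.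
def pvFindHeader (run : List String) : Option (List String) :=
  match run with
  | [] => none
  | line :: rest =>
    if PySem.Str.isIn "T" line || PySem.Str.isIn "K" line then some (line :: rest)
    else pvFindHeader rest

-- Phase 2, outer loop: first run with a header wins; none ⇒ [].
def pvSelect (runs : List (List String)) : List String :=
  match runs with
  | [] => []
  | run :: rest =>
    match pvFindHeader run with
    | some suffix => suffix
    | none => pvSelect rest

def extract_table_from_response_alt (response : String) : List String :=
  pvSelect (pvRunsLoop (((PySem.Str.split? response "\n").getD [])) [] [])

-- ===== PRECONDITION & SPEC =====
def Spec_extract_table_from_response (response : String) (out : List String) : Prop := out = extract_table_from_response_alt response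
instance (response : String) (out : List String) : Decidable (Spec_extract_table_from_response response out) := by unfold Spec_extract_table_from_response; infer_instance

-- ===== CLAIM (what is proved, stated in full; the proofs are below) =====
def Claim_equal_extract_table_from_response : Prop := ∀ (response : String), Dom_extract_table_from_response response → Spec_extract_table_from_response response (extract_table_from_response response)

-- ===== LEMMAS AND PROOFS =====

-- proof helper: what A appends once in_table is set (take-while '|')
def pvCollect (lines : List String) : List String :=
  match lines with
  | [] => []
  | line :: rest =>
    if PySem.Str.isIn "|" line then line :: pvCollect rest else []

theorem pvALoop_true (lines acc : List String) :
    pvALoop lines acc true = acc ++ pvCollect lines := by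
  induction lines generalizing acc with
  | nil => simp [pvALoop, pvCollect]
  | cons line rest ih =>
    by_cases hb : PySem.Chars.isIn ['|'] line.toList = true
    · simp [pvALoop, pvCollect, hb, ih]
    · simp [pvALoop, pvCollect, hb]

theorem pvFindHeader_append_none (a b : List String) (h : pvFindHeader a = none) :
    pvFindHeader (a ++ b) = pvFindHeader b := by
  induction a with
  | nil => simp
  | cons l rest ih =>
    by_cases hl : (PySem.Chars.isIn ['T'] l.toList || PySem.Chars.isIn ['K'] l.toList) = true
    · simp [pvFindHeader, hl] at h
    · simp [pvFindHeader, hl] at h ⊢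
      exact ih h

theorem pvFindHeader_append_some (a b s : List String) (h : pvFindHeader a = some s) :
    pvFindHeader (a ++ b) = some (s ++ b) := by
  induction a with
  | nil => simp [pvFindHeader] at h
  | cons l rest ih =>
    by_cases hl : (PySem.Chars.isIn ['T'] l.toList || PySem.Chars.isIn ['K'] l.toList) = true
    · simp [pvFindHeader, hl] at h ⊢
      simp [← h]
    · simp [pvFindHeader, hl] at h ⊢
      exact ih h

theorem pvSelect_none (a : List (List String)) (h : ∀ r ∈ a, pvFindHeader r = none) :
    pvSelect a = [] := by
  induction a with
  | nil => simp [pvSelect]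
  | cons r rest ih =>
    have hr := h r (by simp)
    simp [pvSelect, hr]
    exact ih (fun x hx => h x (by simp [hx]))

theorem pvHeaderless_push (runs : List (List String)) (cur : List String)
    (hruns : ∀ x ∈ runs, pvFindHeader x = none) (hcur : pvFindHeader cur = none) :
    ∀ x ∈ runs ++ [cur], pvFindHeader x = none := by
  intro x hx
  simp at hx
  rcases hx with hx | hx
  · exact hruns x hx
  · subst hx; exact hcur

theorem pvSelect_fixed (hs extra : List (List String)) (r s : List String)
    (hhs : ∀ x ∈ hs, pvFindHeader x = none) (hr : pvFindHeader r = some s) :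
    pvSelect (hs ++ r :: extra) = s := by
  induction hs with
  | nil => simp [pvSelect, hr]
  | cons x rest ih =>
    have hx := hhs x (by simp)
    simp [pvSelect, hx]
    exact ih (fun y hy => hhs y (by simp [hy]))

-- once a run containing a header is closed, the result is fixed
theorem pvSelect_decided (lines : List String) (cur : List String)
    (hs : List (List String)) (r s : List String) (extra : List (List String))
    (hhs : ∀ x ∈ hs, pvFindHeader x = none) (hr : pvFindHeader r = some s) :
    pvSelect (pvRunsLoop lines cur (hs ++ r :: extra)) = s := by
  induction lines generalizing cur extra with
  | nil =>
    by_cases hc : cur.isEmpty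
    · simp [pvRunsLoop, hc, pvSelect_fixed hs extra r s hhs hr]
    · simp only [pvRunsLoop, hc, Bool.false_eq_true, if_false]
      rw [show (hs ++ r :: extra) ++ [cur] = hs ++ r :: (extra ++ [cur]) by simp]
      exact pvSelect_fixed hs _ r s hhs hr
  | cons line rest ih =>
    by_cases hb : PySem.Chars.isIn ['|'] line.toList = true
    · simp [pvRunsLoop, hb]; exact ih _ _
    · by_cases hc : cur.isEmpty
      · simp [pvRunsLoop, hb, hc]
        exact ih _ _
      · simp [pvRunsLoop, hb, hc]
        exact ih _ _

-- collect state: cur already contains a header, A is appending while '|'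
theorem pvB_collect (lines : List String) (cur s : List String) (runs : List (List String))
    (hruns : ∀ x ∈ runs, pvFindHeader x = none) (hcur : pvFindHeader cur = some s) :
    pvSelect (pvRunsLoop lines cur runs) = s ++ pvCollect lines := by
  induction lines generalizing cur s with
  | nil =>
    have hc : cur.isEmpty = false := by
      cases cur <;> simp_all [pvFindHeader]
    simp only [pvRunsLoop, hc, Bool.false_eq_true, if_false, pvCollect, List.append_nil]
    rw [show runs ++ [cur] = runs ++ cur :: [] by simp]
    exact pvSelect_fixed runs [] cur s hruns hcur
  | cons line rest ih =>
    by_cases hb : PySem.Chars.isIn ['|'] line.toList = true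
    · simp [pvRunsLoop, hb, pvCollect]
      rw [ih (cur ++ [line]) (s ++ [line]) (pvFindHeader_append_some _ _ _ hcur)]
      simp
    · have hc : cur.isEmpty = false := by
        cases cur <;> simp_all [pvFindHeader]
      simp [pvRunsLoop, hb, hc, pvCollect]
      have h2 := pvSelect_decided rest [] runs cur s [] hruns hcur
      simpa using h2

-- search state: no header seen yet; A is pvALoop _ [] false
theorem pvB_search (lines : List String) (cur : List String) (runs : List (List String))
    (hruns : ∀ x ∈ runs, pvFindHeader x = none) (hcur : pvFindHeader cur = none) :
    pvSelect (pvRunsLoop lines cur runs) = pvALoop lines [] false := by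
  induction lines generalizing cur runs with
  | nil =>
    by_cases hc : cur.isEmpty
    · simp [pvRunsLoop, hc, pvALoop, pvSelect_none runs hruns]
    · simp only [pvRunsLoop, hc, Bool.false_eq_true, if_false, pvALoop]
      exact pvSelect_none _ (pvHeaderless_push runs cur hruns hcur)
  | cons line rest ih =>
    by_cases hb : PySem.Chars.isIn ['|'] line.toList = true
    · by_cases hh : (PySem.Chars.isIn ['T'] line.toList || PySem.Chars.isIn ['K'] line.toList) = true
      · -- header line: A enters the table; B's current run now contains a header
        have hfind : pvFindHeader (cur ++ [line]) = some [line] := by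
          rw [pvFindHeader_append_none _ _ hcur]; simp [pvFindHeader, hh]
        simp only [pvRunsLoop]
        rw [if_pos (by simp [PySem.Str.isIn, hb])]
        rw [pvB_collect rest (cur ++ [line]) [line] runs hruns hfind]
        rcases Bool.or_eq_true_iff.mp hh with h | h <;>
          simp [pvALoop, hb, h, pvALoop_true]
      · -- '|' line without header: both skip (B extends the current run)
        have hfind : pvFindHeader (cur ++ [line]) = none := by
          rw [pvFindHeader_append_none _ _ hcur]; simp [pvFindHeader, hh]
        simp only [pvRunsLoop]
        rw [if_pos (by simp [PySem.Str.isIn, hb])]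
        rw [ih (cur ++ [line]) runs hruns hfind]
        simp at hh
        simp [pvALoop, hb, hh]
    · -- non-'|' line: B closes the (headerless) run, A skips
      have hA : pvALoop (line :: rest) [] false = pvALoop rest [] false := by
        simp [pvALoop, hb]
      rw [hA]
      by_cases hc : cur.isEmpty
      · simp [pvRunsLoop, hb, hc]
        exact ih [] runs hruns (by simp [pvFindHeader])
      · simp [pvRunsLoop, hb, hc]
        exact ih [] (runs ++ [cur]) (pvHeaderless_push runs cur hruns hcur)
          (by simp [pvFindHeader])

-- ===== VERDICT (by name: the statement is the Claim_ definition above) =====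
theorem extract_table_from_response_spec : Claim_equal_extract_table_from_response := by
  intro response _
  unfold Spec_extract_table_from_response extract_table_from_response extract_table_from_response_alt
  rw [pvB_search _ [] [] (by simp) (by simp [pvFindHeader])]
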